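-- pv_equiv track=rewrite | github.com/Yuijam/chenxiang | t3.py | isAllRangeValid
-- ===== SOURCE A (Python) =====
-- def isValidVal(val):
--     try:
--         if int(val) >= 30 and int(val) <= 250:
--             return True
--     except:
--         return False
--     return False
--
-- def isAllRangeValid(l):
--     invalidCount = 0
--     for i, v in enumerate(l):
--         if not isValidVal(v):
--             invalidCount = invalidCount + 1
--         else:
--             invalidCount = 0
--
--         if invalidCount >= 3:
--             return False, i - 2
--     return True, None
-- ===== SOURCE B (Python) =====
-- def isValidVal(val):
--     try:
--         if int(val) >= 30 and int(val) <= 250: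
--             return True
--     except:
--         return False
--     return False
--
-- def isAllRangeValid(l):
--     s = ''.join('1' if isValidVal(v) else '0' for v in l)
--     idx = s.find('000')
--     if idx == -1:
--         return True, None
--     return False, idx
-- ===== Notes on version B (the rewrite author's own statement) =====
-- stated objective: alternative
-- what changed: B builds a '0'/'1' validity bitstring over the whole list and locates the first run of three invalids with one str.find('000') call, instead of A's online running-counter loop with early return.
import Mathlib
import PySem

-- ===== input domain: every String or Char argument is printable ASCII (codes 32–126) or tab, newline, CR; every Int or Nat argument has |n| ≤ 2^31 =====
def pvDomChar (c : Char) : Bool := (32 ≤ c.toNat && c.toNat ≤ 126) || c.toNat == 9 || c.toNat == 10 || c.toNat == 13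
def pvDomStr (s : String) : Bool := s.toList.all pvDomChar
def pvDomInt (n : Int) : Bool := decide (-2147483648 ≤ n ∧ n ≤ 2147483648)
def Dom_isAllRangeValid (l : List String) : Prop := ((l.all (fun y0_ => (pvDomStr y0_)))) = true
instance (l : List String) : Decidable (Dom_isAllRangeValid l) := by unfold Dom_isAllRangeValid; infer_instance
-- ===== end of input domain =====

-- B replaces A's running-counter early-return loop by building a '0'/'1' validity
-- bitstring and locating the first "000" with one find call (alternative decomposition).

-- ===== PORT A =====
def isValidVal (val : String) : Bool :=
  match PySem.Int.ofStr? val with      -- int(val); none = ValueError, caught by the except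
  | some n => decide (30 ≤ n) && decide (n ≤ 250)
  | none => false

def isAllRangeValidGo : List String → Int → Int → Bool × Option Int
  | [], _, _ => (true, none)
  | v :: rest, i, invalidCount =>
    let invalidCount' := if !isValidVal v then invalidCount + 1 else 0
    if invalidCount' ≥ 3 then (false, some (i - 2))
    else isAllRangeValidGo rest (i + 1) invalidCount'

def isAllRangeValid (l : List String) : Bool × Option Int :=
  isAllRangeValidGo l 0 0

-- ===== PORT B =====
def isAllRangeValid_alt (l : List String) : Bool × Option Int :=
  let s := PySem.Str.join "" (l.map (fun v => if isValidVal v then "1" else "0"))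
  let idx := PySem.Str.find s "000"
  if idx = -1 then (true, none) else (false, some idx)

-- ===== PRECONDITION & SPEC =====
def Spec_isAllRangeValid (l : List String) (out : Bool × Option Int) : Prop := out = isAllRangeValid_alt l
instance (l : List String) (out : Bool × Option Int) : Decidable (Spec_isAllRangeValid l out) := by unfold Spec_isAllRangeValid; infer_instance

-- ===== CLAIM (what is proved, stated in full; the proofs are below) =====
def Claim_equal_isAllRangeValid : Prop := ∀ (l : List String), Dom_isAllRangeValid l → Spec_isAllRangeValid l (isAllRangeValid l)

-- ===== LEMMAS AND PROOFS =====

def pvFlags (l : List String) : List Char :=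
  l.map (fun v => if isValidVal v then '1' else '0')

theorem pvGo_cons (sub : List Char) (c : Char) (t : List Char) (k : Nat) :
    PySem.Chars.find.go sub (c :: t) k =
      if sub.isPrefixOf (c :: t) then (k : Int) else PySem.Chars.find.go sub t (k + 1) := rfl

theorem pvGo_nil (sub : List Char) (k : Nat) :
    PySem.Chars.find.go sub [] k = if sub.isEmpty then (k : Int) else -1 := rfl

theorem pvMain (l : List String) (c : Nat) (hc : c ≤ 2) (i : Int) (k : Nat) :
    isAllRangeValidGo l i (c : Int) =
      (if PySem.Chars.find.go ['0','0','0'] (List.replicate c '0' ++ pvFlags l) k = -1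
       then (true, none)
       else (false, some (i - c + (PySem.Chars.find.go ['0','0','0'] (List.replicate c '0' ++ pvFlags l) k - k)))) := by
  induction l generalizing c i k with
  | nil =>
    interval_cases c <;>
      simp [isAllRangeValidGo, pvFlags, pvGo_cons, pvGo_nil, List.isPrefixOf]
  | cons v rest ih =>
    by_cases hb : isValidVal v
    · have h1 : pvFlags (v :: rest) = '1' :: pvFlags rest := by simp [pvFlags, hb]
      have hL : isAllRangeValidGo (v :: rest) i (c : Int) = isAllRangeValidGo rest (i + 1) ((0:Nat) : Int) := by
        simp [isAllRangeValidGo, hb]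
      interval_cases c
      · rw [h1, hL, ih 0 (by omega) (i+1) (k+1)]
        simp only [List.replicate, List.nil_append, pvGo_cons, List.isPrefixOf]
        norm_num
        by_cases ht : PySem.Chars.find.go ['0','0','0'] (pvFlags rest) (k+1) = -1 <;>
          simp [ht] <;> (push_cast; omega)
      · rw [h1, hL, ih 0 (by omega) (i+1) (k+2)]
        simp only [List.replicate, List.nil_append, List.cons_append, pvGo_cons, List.isPrefixOf]
        norm_num
        by_cases ht : PySem.Chars.find.go ['0','0','0'] (pvFlags rest) (k+2) = -1 <;>
          · rw [show k + 1 + 1 = k + 2 from rfl]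
            simp [ht] <;> (push_cast; omega)
      · rw [h1, hL, ih 0 (by omega) (i+1) (k+3)]
        simp only [List.replicate, List.nil_append, List.cons_append, pvGo_cons, List.isPrefixOf]
        norm_num
        by_cases ht : PySem.Chars.find.go ['0','0','0'] (pvFlags rest) (k+3) = -1 <;>
          · rw [show k + 1 + 1 + 1 = k + 3 from rfl]
            simp [ht] <;> (push_cast; omega)
    · have h1 : pvFlags (v :: rest) = '0' :: pvFlags rest := by simp [pvFlags, hb]
      interval_cases c
      · have hL : isAllRangeValidGo (v :: rest) i ((0 : Nat) : Int) =
            isAllRangeValidGo rest (i + 1) ((1 : Nat) : Int) := by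
          simp [isAllRangeValidGo, hb]
        rw [h1, hL, ih 1 (by omega) (i+1) k]
        simp only [List.replicate, List.nil_append, List.cons_append]
        by_cases ht : PySem.Chars.find.go ['0','0','0'] ('0' :: pvFlags rest) k = -1 <;>
          simp [ht] <;> (push_cast; omega)
      · have hL : isAllRangeValidGo (v :: rest) i ((1 : Nat) : Int) =
            isAllRangeValidGo rest (i + 1) ((2 : Nat) : Int) := by
          simp [isAllRangeValidGo, hb]
        rw [h1, hL, ih 2 (by omega) (i+1) k]
        simp only [List.replicate, List.nil_append, List.cons_append]
        by_cases ht : PySem.Chars.find.go ['0','0','0'] ('0' :: '0' :: pvFlags rest) k = -1 <;>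
          simp [ht] <;> omega
      · have hL : isAllRangeValidGo (v :: rest) i ((2 : Nat) : Int) = (false, some (i - 2)) := by
          simp [isAllRangeValidGo, hb]
        rw [h1, hL]
        simp only [List.replicate, List.nil_append, List.cons_append, pvGo_cons, List.isPrefixOf]
        have hk : ¬((k : Int) = -1) := by omega
        simp [hk]

theorem pvAlt_eq (l : List String) :
    isAllRangeValid_alt l =
      (if PySem.Chars.find.go ['0','0','0'] (pvFlags l) 0 = -1
       then (true, none)
       else (false, some (PySem.Chars.find.go ['0','0','0'] (pvFlags l) 0))) := by
  have hparts : (l.map (fun v => if isValidVal v then "1" else "0")).map String.toList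
      = (pvFlags l).map (fun ch => [ch]) := by
    simp only [pvFlags, List.map_map]
    refine List.map_congr_left (fun a _ => ?_)
    by_cases h : isValidVal a <;> simp [h]
  simp only [isAllRangeValid_alt, PySem.Str.join, PySem.Str.find, String.toList_ofList, hparts]
  rw [show ("" : String).toList = [] from rfl, PySem.Chars.join_nil_singletons]
  rfl

-- ===== VERDICT (by name: the statement is the Claim_ definition above) =====
theorem isAllRangeValid_spec : Claim_equal_isAllRangeValid := by
  intro l _
  show isAllRangeValid l = isAllRangeValid_alt l
  have h := pvMain l 0 (by omega) 0 0
  simp only [Nat.cast_zero, List.replicate, List.nil_append, sub_zero, zero_add] at h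
  rw [pvAlt_eq, show isAllRangeValid l = isAllRangeValidGo l 0 0 from rfl, h]
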